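-- pv_equiv track=rewrite | github.com/kevlaime/parcial-domiciliario | parcial/funciones.py | es_alfabetico
-- ===== SOURCE A (Python) =====
-- def es_alfabetico(cadena:str) -> bool:
--     """Verifica si una cadena contiene solo letras (sin espacios ni caracteres especiales).
--     Args:
--         cadena (str): Cadena de texto a validar.
--     Returns:
--         bool: Devuelve True si la cadena contiene solo letras. Sino False.
--     """
--     if len(cadena) > 0:
--         retorno = True
--         for i in range(len(cadena)):
--             valor_ascii = ord(cadena[i])
--             if (valor_ascii > 90 or valor_ascii < 65) and (valor_ascii > 122 or valor_ascii < 97):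
--                 retorno = False
--                 break
--     else:
--         retorno = False
--
--     return retorno
-- ===== SOURCE B (Python) =====
-- import re
--
-- def es_alfabetico(cadena: str) -> bool:
--     """True iff cadena is non-empty and consists only of ASCII letters."""
--     return bool(re.fullmatch(r'[A-Za-z]+', cadena))
-- ===== Notes on version B (the rewrite author's own statement) =====
-- stated objective: idiomatic
-- what changed: Replaces the explicit index loop over ord() ranges with a single re.fullmatch against the ASCII class [A-Za-z]+, whose + quantifier also handles the empty-string case that A special-cases.
import Mathlib
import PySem

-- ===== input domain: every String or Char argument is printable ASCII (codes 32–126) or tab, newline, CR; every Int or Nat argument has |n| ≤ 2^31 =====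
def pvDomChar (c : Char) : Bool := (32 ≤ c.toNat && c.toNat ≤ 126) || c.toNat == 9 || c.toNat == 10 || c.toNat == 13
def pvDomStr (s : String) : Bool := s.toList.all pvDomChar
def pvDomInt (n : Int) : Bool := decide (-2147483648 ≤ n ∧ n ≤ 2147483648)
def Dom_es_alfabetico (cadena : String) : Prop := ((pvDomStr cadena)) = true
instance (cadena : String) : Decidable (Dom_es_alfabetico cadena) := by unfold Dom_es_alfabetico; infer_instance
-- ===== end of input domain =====

-- B replaces A's explicit ord()-range index loop by one re.fullmatch over the ASCII class [A-Za-z]+ (idiomatic; return value only).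
-- ===== PORT A =====
-- the for-loop with break: returns false at the first non-letter, true if the scan finishes
def esAlfaLoop : List Char → Bool
  | [] => true
  | c :: rest =>
    let valor_ascii := c.toNat
    if (valor_ascii > 90 || valor_ascii < 65) && (valor_ascii > 122 || valor_ascii < 97) then
      false
    else
      esAlfaLoop rest

def es_alfabetico (cadena : String) : Bool :=
  if cadena.toList.length > 0 then esAlfaLoop cadena.toList else false

-- ===== PORT B =====
-- transliteration of re.fullmatch(r'[A-Za-z]+', cadena): at least one char, every char in the class
def es_alfabetico_alt (cadena : String) : Bool :=
  !cadena.toList.isEmpty && cadena.toList.all (fun c => ('A' ≤ c && c ≤ 'Z') || ('a' ≤ c && c ≤ 'z'))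

-- ===== PRECONDITION & SPEC =====
def Spec_es_alfabetico (cadena : String) (out : Bool) : Prop := out = es_alfabetico_alt cadena
instance (cadena : String) (out : Bool) : Decidable (Spec_es_alfabetico cadena out) := by unfold Spec_es_alfabetico; infer_instance

-- ===== CLAIM (what is proved, stated in full; the proofs are below) =====
def Claim_equal_es_alfabetico : Prop := ∀ (cadena : String), Dom_es_alfabetico cadena → Spec_es_alfabetico cadena (es_alfabetico cadena)

-- ===== LEMMAS AND PROOFS =====
theorem esAlfaLoop_eq_all (l : List Char) :
    esAlfaLoop l = l.all (fun c => ('A' ≤ c && c ≤ 'Z') || ('a' ≤ c && c ≤ 'z')) := by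
  induction l with
  | nil => rfl
  | cons c rest ih =>
    simp only [esAlfaLoop, List.all_cons, ih]
    have hbad : ((c.toNat > 90 || c.toNat < 65) && (c.toNat > 122 || c.toNat < 97))
        = !(('A' ≤ c && c ≤ 'Z') || ('a' ≤ c && c ≤ 'z')) := by
      rw [Bool.eq_iff_iff]
      simp only [Bool.and_eq_true, Bool.or_eq_true, Bool.not_eq_eq_eq_not, Bool.not_true,
        Bool.or_eq_false_iff, Bool.and_eq_false_iff, decide_eq_true_iff, decide_eq_false_iff_not,
        not_le, gt_iff_lt, Char.le_def, UInt32.le_iff_toNat_le, Char.toNat,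
        show 'A'.val.toNat = 65 from rfl, show 'Z'.val.toNat = 90 from rfl,
        show 'a'.val.toNat = 97 from rfl, show 'z'.val.toNat = 122 from rfl]
      omega
    by_cases h : (('A' ≤ c && c ≤ 'Z') || ('a' ≤ c && c ≤ 'z')) = true <;> simp [hbad, h]

-- ===== VERDICT (by name: the statement is the Claim_ definition above) =====
theorem es_alfabetico_spec : Claim_equal_es_alfabetico := by
  intro cadena _
  unfold Spec_es_alfabetico es_alfabetico es_alfabetico_alt
  cases h : cadena.toList with
  | nil => simp
  | cons c rest => simp [esAlfaLoop_eq_all]
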